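-- pv_equiv track=rewrite | github.com/pypi-data/pypi-mirror-65 | packages/oligodimer/oligodimer-1.0.1.tar.gz/oligodimer-1.0.1/oligodimer/core/multiplex.py | transform_degenerate
-- ===== SOURCE A (Python) =====
-- def transform_degenerate(seq):
-- 	seq = seq.upper()
-- 	basesub = {'R': 'A',
-- 		'Y': 'C',
-- 		'M': 'A',
-- 		'K': 'G',
-- 		'S': 'G',
-- 		'W': 'A',
-- 		'H': 'A',
-- 		'B': 'G',
-- 		'V': 'G',
-- 		'D': 'G'}
-- 	for base in basesub.keys():
-- 		seq = seq.replace(base, basesub[base])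
-- 	return seq
-- ===== SOURCE B (Python) =====
-- def transform_degenerate(seq):
-- 	return seq.upper().translate(str.maketrans('RYMKSWHBVD', 'ACAGGAAGGG'))
-- ===== Notes on version B (the rewrite author's own statement) =====
-- stated objective: idiomatic
-- what changed: A loops over a dict of degenerate bases and rescans the whole string once per key (10 str.replace calls); B drops the dict and the loop entirely and applies a single character translation table (str.translate with str.maketrans over two parallel base strings) in one pass, which is exact because no substitution value is itself a degenerate base.
import Mathlib
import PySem

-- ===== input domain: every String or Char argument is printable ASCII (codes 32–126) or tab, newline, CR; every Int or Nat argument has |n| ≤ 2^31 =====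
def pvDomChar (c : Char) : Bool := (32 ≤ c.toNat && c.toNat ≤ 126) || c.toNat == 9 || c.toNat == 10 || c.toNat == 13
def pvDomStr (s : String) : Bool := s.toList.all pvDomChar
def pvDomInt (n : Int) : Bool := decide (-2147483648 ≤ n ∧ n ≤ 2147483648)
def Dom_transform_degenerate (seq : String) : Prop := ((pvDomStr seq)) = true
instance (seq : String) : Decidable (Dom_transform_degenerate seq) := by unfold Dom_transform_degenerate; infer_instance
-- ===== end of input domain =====

-- B replaces A's dict-driven loop of ten full-string `replace` scans by one character-translation-table pass (str.translate/maketrans); objective: idiomatic.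


-- ===== PORT A =====
-- A's dict literal
def basesubA : PySem.Dict String String :=
  PySem.Dict.ofList [("R","A"),("Y","C"),("M","A"),("K","G"),("S","G"),
                     ("W","A"),("H","A"),("B","G"),("V","G"),("D","G")]

-- for base in basesub.keys(): seq = seq.replace(base, basesub[base])
def transform_degenerate (seq : String) : String :=
  (PySem.Dict.keys basesubA).foldl
    (fun s base => PySem.Str.replace s base (basesubA.getD base ""))
    (PySem.Str.upper seq)

-- ===== PORT B =====
-- str.maketrans('RYMKSWHBVD', 'ACAGGAAGGG'): the table pairs the i-th chars of the two strings
def transTable : List (Char × Char) :=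
  List.zip ("RYMKSWHBVD" : String).toList ("ACAGGAAGGG" : String).toList

-- str.translate: each character is looked up in the table, unmapped characters pass through
def transform_degenerate_alt (seq : String) : String :=
  String.ofList
    ((PySem.Str.upper seq).toList.map
      (fun c => (((transTable.find? (fun p => p.1 == c)).map Prod.snd)).getD c))

-- ===== PRECONDITION & SPEC =====
def Spec_transform_degenerate (seq : String) (out : String) : Prop := out = transform_degenerate_alt seq
instance (seq : String) (out : String) : Decidable (Spec_transform_degenerate seq out) := by unfold Spec_transform_degenerate; infer_instance

-- ===== CLAIM (what is proved, stated in full; the proofs are below) =====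
def Claim_equal_transform_degenerate : Prop := ∀ (seq : String), Dom_transform_degenerate seq → Spec_transform_degenerate seq (transform_degenerate seq)

-- ===== LEMMAS AND PROOFS =====

-- single-character str.replace is a pointwise map over the characters
theorem go_single (a b : Char) : ∀ (l : List Char) (fuel : Nat) (acc : List Char),
    l.length ≤ fuel →
    PySem.Chars.replace.go [a] [b] fuel l acc
      = acc.reverse ++ l.map (fun c => if c = a then b else c) := by
  intro l
  induction l with
  | nil => intro fuel acc _; cases fuel <;> simp [PySem.Chars.replace.go]
  | cons c t ih =>
    intro fuel acc h
    cases fuel with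
    | zero => simp at h
    | succ n =>
      simp only [PySem.Chars.replace.go]
      by_cases hc : a = c
      · subst hc
        simp only [List.isPrefixOf, BEq.rfl, Bool.true_and, if_pos, List.length_singleton,
          List.drop_one, List.tail_cons]
        rw [ih n _ (by simpa using h)]
        simp
      · have hp : ([a].isPrefixOf (c :: t)) = false := by
          simp [List.isPrefixOf, hc]
        rw [hp]
        simp only [Bool.false_eq_true, if_false]
        rw [ih n _ (by simpa using h)]
        simp [Ne.symm hc]

theorem replace_single (a b : Char) (l : List Char) :
    PySem.Chars.replace l [a] [b] = l.map (fun c => if c = a then b else c) := by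
  have := go_single a b l l.length [] (le_refl _)
  simpa [PySem.Chars.replace] using this

-- the character-level substitution both programs realise
def subc (c : Char) : Char :=
  if c = 'R' then 'A' else if c = 'Y' then 'C' else if c = 'M' then 'A' else
  if c = 'K' then 'G' else if c = 'S' then 'G' else if c = 'W' then 'A' else
  if c = 'H' then 'A' else if c = 'B' then 'G' else if c = 'V' then 'G' else
  if c = 'D' then 'G' else c

-- B's table lookup computes subc
theorem table_lookup (c : Char) :
    (((transTable.find? (fun p => p.1 == c)).map Prod.snd)).getD c = subc c := by
  by_cases hR : c = 'R'; · subst hR; decide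
  by_cases hY : c = 'Y'; · subst hY; decide
  by_cases hM : c = 'M'; · subst hM; decide
  by_cases hK : c = 'K'; · subst hK; decide
  by_cases hS : c = 'S'; · subst hS; decide
  by_cases hW : c = 'W'; · subst hW; decide
  by_cases hH : c = 'H'; · subst hH; decide
  by_cases hB : c = 'B'; · subst hB; decide
  by_cases hV : c = 'V'; · subst hV; decide
  by_cases hD : c = 'D'; · subst hD; decide
  have ht : transTable
      = [('R','A'),('Y','C'),('M','A'),('K','G'),('S','G'),
         ('W','A'),('H','A'),('B','G'),('V','G'),('D','G')] := by decide
  have h'R : ('R' == c) = false := by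
    simp only [beq_eq_false_iff_ne]; exact fun h => hR h.symm
  have h'Y : ('Y' == c) = false := by
    simp only [beq_eq_false_iff_ne]; exact fun h => hY h.symm
  have h'M : ('M' == c) = false := by
    simp only [beq_eq_false_iff_ne]; exact fun h => hM h.symm
  have h'K : ('K' == c) = false := by
    simp only [beq_eq_false_iff_ne]; exact fun h => hK h.symm
  have h'S : ('S' == c) = false := by
    simp only [beq_eq_false_iff_ne]; exact fun h => hS h.symm
  have h'W : ('W' == c) = false := by
    simp only [beq_eq_false_iff_ne]; exact fun h => hW h.symm
  have h'H : ('H' == c) = false := by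
    simp only [beq_eq_false_iff_ne]; exact fun h => hH h.symm
  have h'B : ('B' == c) = false := by
    simp only [beq_eq_false_iff_ne]; exact fun h => hB h.symm
  have h'V : ('V' == c) = false := by
    simp only [beq_eq_false_iff_ne]; exact fun h => hV h.symm
  have h'D : ('D' == c) = false := by
    simp only [beq_eq_false_iff_ne]; exact fun h => hD h.symm
  simp [ht, List.find?, h'R, h'Y, h'M, h'K, h'S, h'W, h'H, h'B, h'V, h'D,
        subc, hR, hY, hM, hK, hS, hW, hH, hB, hV, hD]

theorem altList (seq : String) :
    (transform_degenerate_alt seq).toList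
      = (PySem.Chars.upper seq.toList).map subc := by
  simp only [transform_degenerate_alt, PySem.Str.toList_upper, String.toList_ofList]
  exact List.map_congr_left (fun c _ => table_lookup c)

-- A's chain of ten single-character substitutions agrees with subc
theorem chain_eq :
    ((fun c => if c = 'D' then 'G' else c) ∘
     (fun c => if c = 'V' then 'G' else c) ∘
     (fun c => if c = 'B' then 'G' else c) ∘
     (fun c => if c = 'H' then 'A' else c) ∘
     (fun c => if c = 'W' then 'A' else c) ∘
     (fun c => if c = 'S' then 'G' else c) ∘
     (fun c => if c = 'K' then 'G' else c) ∘
     (fun c => if c = 'M' then 'A' else c) ∘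
     (fun c => if c = 'Y' then 'C' else c) ∘
     (fun c => if c = 'R' then 'A' else c)) = subc := by
  funext c
  by_cases hR : c = 'R'; · subst hR; decide
  by_cases hY : c = 'Y'; · subst hY; decide
  by_cases hM : c = 'M'; · subst hM; decide
  by_cases hK : c = 'K'; · subst hK; decide
  by_cases hS : c = 'S'; · subst hS; decide
  by_cases hW : c = 'W'; · subst hW; decide
  by_cases hH : c = 'H'; · subst hH; decide
  by_cases hB : c = 'B'; · subst hB; decide
  by_cases hV : c = 'V'; · subst hV; decide
  by_cases hD : c = 'D'; · subst hD; decide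
  simp [Function.comp, subc, hR, hY, hM, hK, hS, hW, hH, hB, hV, hD]

theorem getD_A_R : (basesubA.getD "R" "").toList = ['A'] := by decide
theorem getD_A_Y : (basesubA.getD "Y" "").toList = ['C'] := by decide
theorem getD_A_M : (basesubA.getD "M" "").toList = ['A'] := by decide
theorem getD_A_K : (basesubA.getD "K" "").toList = ['G'] := by decide
theorem getD_A_S : (basesubA.getD "S" "").toList = ['G'] := by decide
theorem getD_A_W : (basesubA.getD "W" "").toList = ['A'] := by decide
theorem getD_A_H : (basesubA.getD "H" "").toList = ['A'] := by decide
theorem getD_A_B : (basesubA.getD "B" "").toList = ['G'] := by decide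
theorem getD_A_V : (basesubA.getD "V" "").toList = ['G'] := by decide
theorem getD_A_D : (basesubA.getD "D" "").toList = ['G'] := by decide
theorem lit_R : ("R" : String).toList = ['R'] := by decide
theorem lit_Y : ("Y" : String).toList = ['Y'] := by decide
theorem lit_M : ("M" : String).toList = ['M'] := by decide
theorem lit_K : ("K" : String).toList = ['K'] := by decide
theorem lit_S : ("S" : String).toList = ['S'] := by decide
theorem lit_W : ("W" : String).toList = ['W'] := by decide
theorem lit_H : ("H" : String).toList = ['H'] := by decide
theorem lit_B : ("B" : String).toList = ['B'] := by decide
theorem lit_V : ("V" : String).toList = ['V'] := by decide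
theorem lit_D : ("D" : String).toList = ['D'] := by decide
theorem keysA : PySem.Dict.keys basesubA = ["R","Y","M","K","S","W","H","B","V","D"] := by decide

theorem toList_replace_single (s k v : String) (a b : Char)
    (hk : k.toList = [a]) (hv : v.toList = [b]) :
    (PySem.Str.replace s k v).toList
      = s.toList.map (fun c => if c = a then b else c) := by
  rw [PySem.Str.toList_replace, hk, hv, replace_single]

set_option maxRecDepth 8000 in
set_option maxHeartbeats 1000000 in
theorem aList (seq : String) :
    (transform_degenerate seq).toList
      = (PySem.Chars.upper seq.toList).map subc := by
  rw [transform_degenerate, keysA]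
  simp only [List.foldl]
  rw [toList_replace_single _ _ _ 'D' 'G' lit_D getD_A_D]
  rw [toList_replace_single _ _ _ 'V' 'G' lit_V getD_A_V]
  rw [toList_replace_single _ _ _ 'B' 'G' lit_B getD_A_B]
  rw [toList_replace_single _ _ _ 'H' 'A' lit_H getD_A_H]
  rw [toList_replace_single _ _ _ 'W' 'A' lit_W getD_A_W]
  rw [toList_replace_single _ _ _ 'S' 'G' lit_S getD_A_S]
  rw [toList_replace_single _ _ _ 'K' 'G' lit_K getD_A_K]
  rw [toList_replace_single _ _ _ 'M' 'A' lit_M getD_A_M]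
  rw [toList_replace_single _ _ _ 'Y' 'C' lit_Y getD_A_Y]
  rw [toList_replace_single _ _ _ 'R' 'A' lit_R getD_A_R]
  simp only [PySem.Str.toList_upper, List.map_map]
  rw [chain_eq]

-- ===== VERDICT (by name: the statement is the Claim_ definition above) =====
set_option maxHeartbeats 1600000 in
theorem transform_degenerate_spec : Claim_equal_transform_degenerate := by
  intro seq _
  unfold Spec_transform_degenerate
  rw [← String.toList_inj, aList, altList]
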